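-- pv_equiv track=rewrite | github.com/weiyinfu/DailyAlgorithm | Geometry/猜数字/笨方法.py | bfs
-- ===== SOURCE A (Python) =====
-- from typing import List, Tuple
--
-- def bfs(g: List[List[int]]):
--     # 广度优先求深度
--     f = [-1] * len(g)
--     q = [0]
--     f[0] = 0
--     i = 0
--     while i < len(q):
--         now = q[i]
--         i += 1
--         for to in g[now]:
--             if f[to] != -1:
--                 continue
--             f[to] = f[now] + 1
--             q.append(to)
--     return max(f)
-- ===== SOURCE B (Python) =====
-- from typing import List
--
-- def bfs(g: List[List[int]]):
--     # closure-style BFS: no queue and no distances — re-scan every reached row each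
--     # round, collect the still-unreached neighbours, count the rounds that grow
--     n = len(g)
--     reach = [False] * n
--     reach[0] = True
--     depth = 0
--     for _ in range(n):
--         new = [v for u in range(n) if reach[u] for v in g[u] if not reach[v]]
--         if not new:
--             break
--         for v in new:
--             reach[v] = True
--         depth += 1
--     return depth
-- ===== Notes on version B (the rewrite author's own statement) =====
-- stated objective: alternative
-- what changed: B replaces A's flat index-pointer queue, distance array with -1 sentinels and final max(f) pass by a closure-style iteration: a boolean reached array is grown one level per round by re-scanning every reached row and marking the still-unreached neighbours, and the number of growing rounds is the answer.
import Mathlib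
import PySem

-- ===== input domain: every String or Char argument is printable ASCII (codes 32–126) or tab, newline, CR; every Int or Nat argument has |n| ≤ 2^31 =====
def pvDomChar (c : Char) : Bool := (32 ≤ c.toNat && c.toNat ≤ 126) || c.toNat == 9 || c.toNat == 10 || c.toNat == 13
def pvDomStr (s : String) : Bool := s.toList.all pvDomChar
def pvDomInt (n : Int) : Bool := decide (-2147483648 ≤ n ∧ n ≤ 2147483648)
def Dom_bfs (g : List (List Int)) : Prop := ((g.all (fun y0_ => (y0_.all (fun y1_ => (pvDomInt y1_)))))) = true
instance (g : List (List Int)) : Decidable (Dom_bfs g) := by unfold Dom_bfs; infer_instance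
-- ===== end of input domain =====

-- B replaces A's distance array + flat index queue + final max(f) by a reachability-closure
-- iteration (a set of reached ids grown one level per round; the round count is the answer);
-- objective: alternative (no speed claim).

-- ===== PORT A =====
-- (the lemmas before `bfsLoop` exist only because the ports cite them in `decreasing_by`)

-- setting a cell that holds `a` to a different value lowers the count of `a`
theorem count_set_lt {a : Type} [BEq a] [LawfulBEq a] (f : List a) (c : a) (k : Nat)
    (hk : k < f.length) (hv : f[k] = c) (nv : a) (hnv : nv != c) :
    (f.set k nv).count c + 1 <= f.count c := by
  induction f generalizing k with
  | nil => simp at hk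
  | cons x t ih =>
    cases k with
    | zero =>
      simp only [List.getElem_cons_zero] at hv
      subst hv
      simp only [List.set_cons_zero, List.count_cons]
      simpa using hnv
    | succ k =>
      simp only [List.set_cons_succ, List.count_cons]
      have := ih k (by simpa using hk) (by simpa using hv)
      omega

-- a successful Python read xs[i] pins one plain Nat index k; any same-length list is read/written at that k
theorem pyAccess {a : Type} (f : List a) (i : Int) (v : a) (h : PySem.List.pyGet? f i = some v) :
    ∃ k : Nat, k < f.length ∧ f[k]? = some v ∧
      ((k : Int) = i ∨ (k : Int) = i + f.length) ∧
      (∀ {b : Type} (ys : List b), ys.length = f.length →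
        PySem.List.pyGet? ys i = ys[k]? ∧ ∀ w, PySem.List.pySetD ys i w = ys.set k w) := by
  unfold PySem.List.pyGet? PySem.List.pyIdx? at h
  split_ifs at h with h1 h2 h3
  · refine ⟨i.toNat, ?_, ?_, Or.inl (by omega), ?_⟩
    · by_contra hc
      simp [List.getElem?_eq_none (by omega : f.length <= i.toNat)] at h
    · simpa using h
    · intro b ys hlen
      constructor
      · unfold PySem.List.pyGet? PySem.List.pyIdx?
        rw [hlen, if_pos h1, if_pos h2]
        simp
      · intro w
        unfold PySem.List.pySetD PySem.List.pySet? PySem.List.pyIdx?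
        rw [hlen, if_pos h1, if_pos h2]
        simp
  · simp at h
  · refine ⟨f.length - (-i).toNat, ?_, ?_, Or.inr (by omega), ?_⟩
    · omega
    · simpa using h
    · intro b ys hlen
      constructor
      · unfold PySem.List.pyGet? PySem.List.pyIdx?
        rw [hlen, if_neg h1, if_pos h3]
        simp
      · intro w
        unfold PySem.List.pySetD PySem.List.pySet? PySem.List.pyIdx?
        rw [hlen, if_neg h1, if_pos h3]
        simp
  · simp at h

-- one step of A's inner loop: `for to in g[now]: if f[to] != -1: continue; f[to] = f[now]+1; q.append(to)`
def bfsInnerStep (now : Int) (st : List Int × List Int) (dst : Int) : List Int × List Int :=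
  match PySem.List.pyGet? st.1 dst with
  | none => st            -- Python raises IndexError at `f[to]`; such inputs are outside Pre_bfs
  | some v =>
    if v ≠ -1 then st     -- `continue`
    else
      let nv := (PySem.List.pyGet? st.1 now).getD 0 + 1   -- f[now] + 1 (f[now] never raises when Python reaches this line)
      if nv = -1 then st  -- totality guard only, unreachable: f never holds a value below -1
      else (PySem.List.pySetD st.1 dst nv, st.2 ++ [dst])

theorem bfsInnerStep_bound (now dst : Int) (st : List Int × List Int) :
    2 * (bfsInnerStep now st dst).1.count (-1) + (bfsInnerStep now st dst).2.length
      <= 2 * st.1.count (-1) + st.2.length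
    ∧ st.2.length <= (bfsInnerStep now st dst).2.length := by
  unfold bfsInnerStep
  cases h : PySem.List.pyGet? st.1 dst with
  | none => exact ⟨le_refl _, le_refl _⟩
  | some v =>
    simp only
    split_ifs with h1 h2
    · exact ⟨le_refl _, le_refl _⟩
    · exact ⟨le_refl _, le_refl _⟩
    · obtain ⟨k, hk, hkv, -, hys⟩ := pyAccess st.1 dst v h
      simp only [not_not] at h1
      subst h1
      have hkv' : st.1[k] = -1 := by
        rw [List.getElem?_eq_getElem hk] at hkv
        exact Option.some.inj hkv
      have hcnt := count_set_lt st.1 (-1) k hk hkv'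
        ((PySem.List.pyGet? st.1 now).getD 0 + 1) (by simpa using h2)
      rw [(hys st.1 rfl).2]
      simp only [List.length_append, List.length_cons, List.length_nil]
      omega

theorem bfsInner_bound (now : Int) (row : List Int) (st : List Int × List Int) :
    2 * (row.foldl (bfsInnerStep now) st).1.count (-1) + (row.foldl (bfsInnerStep now) st).2.length
      <= 2 * st.1.count (-1) + st.2.length
    ∧ st.2.length <= (row.foldl (bfsInnerStep now) st).2.length := by
  induction row generalizing st with
  | nil => exact ⟨le_refl _, le_refl _⟩
  | cons dst rest ih =>
    have h1 := bfsInnerStep_bound now dst st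
    have h2 := ih (bfsInnerStep now st dst)
    simp only [List.foldl_cons] at *
    omega

-- A's while loop over the queue index i
def bfsLoop (g : List (List Int)) (f q : List Int) (i : Nat) : List Int :=
  if h : i < q.length then
    let now := q[i]
    let row := (PySem.List.pyGet? g now).getD []   -- none = Python IndexError at `g[now]`; outside Pre_bfs
    let st := row.foldl (bfsInnerStep now) (f, q)
    bfsLoop g st.1 st.2 (i + 1)
  else f
termination_by 2 * f.count (-1) + (q.length - i)
decreasing_by
  obtain ⟨h1, h2⟩ := bfsInner_bound q[i] ((PySem.List.pyGet? g q[i]).getD []) (f, q)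
  simp only at h1 h2 ⊢
  omega

def bfs (g : List (List Int)) : Int :=
  if g.length = 0 then 0   -- Python raises IndexError at `f[0] = 0` when g = []; outside Pre_bfs
  else
    let f0 := (List.replicate g.length (-1 : Int)).set 0 0   -- f = [-1]*len(g); f[0] = 0
    (PySem.List.max? (bfsLoop g f0 [0] 0) (fun x => x)).getD 0   -- max(f); getD-default unreachable (f ≠ [])
-- ===== PORT B =====

-- `new = [v for u in range(n) if reach[u] for v in g[u] if not reach[v]]`
-- (`reach[u]` and `g[u]` never raise: u ∈ range(n); `reach[v]` raises IndexError for an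
--  out-of-range v = pyGet? none, outside Pre_bfs — rendered total with getD)
def newFresh (g : List (List Int)) (n : Nat) (reach : List Bool) : List Int :=
  (PySem.List.pyRange 0 (n : Int) 1).flatMap (fun u =>
    if (PySem.List.pyGet? reach u).getD false = true then
      ((PySem.List.pyGet? g u).getD []).filter
        (fun v => !((PySem.List.pyGet? reach v).getD true))
    else [])

-- `for v in new: reach[v] = True`
def markAll (reach : List Bool) (new : List Int) : List Bool :=
  new.foldl (fun r v => PySem.List.pySetD r v true) reach

-- `for _ in range(n): new = …; if not new: break; …; depth += 1`
def bLoop (g : List (List Int)) (n : Nat) (fuel : Nat) (reach : List Bool) (depth : Int) : Int :=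
  match fuel with
  | 0 => depth
  | fuel' + 1 =>
    let nw := newFresh g n reach
    if nw.isEmpty then depth
    else bLoop g n fuel' (markAll reach nw) (depth + 1)

def bfs_alt (g : List (List Int)) : Int :=
  if g.length = 0 then 0   -- Python raises IndexError at `reach[0] = True` when g = []; outside Pre_bfs
  else
    -- reach = [False]*n; reach[0] = True; depth = 0
    bLoop g g.length g.length (PySem.List.pySetD (List.replicate g.length false) 0 true) 0
-- ===== PRECONDITION & SPEC =====
-- Pre_bfs excludes exactly the inputs on which A raises IndexError: the empty graph (at `f[0] = 0`)
-- and graphs in which the traversal from node 0 reaches an entry outside [-len(g), len(g))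
-- (at `f[to]`). Stated without running anything: some set S of valid node ids contains 0, is closed
-- under the (Python-indexing, so possibly negative) entries of its rows, and those entries are all
-- in range. Rows unreachable from node 0 are unconstrained (A never reads them).
def Pre_bfs (g : List (List Int)) : Prop :=
  g ≠ [] ∧ ∃ S : Finset (Fin g.length),
    (∀ a : Fin g.length, a.val = 0 → a ∈ S) ∧
    (∀ a ∈ S, ∀ v ∈ g[a.val]'a.isLt,
      (-(g.length : Int) <= v ∧ v < (g.length : Int)) ∧
      ∀ b : Fin g.length, ((b.val : Int) = v ∨ (b.val : Int) = v + (g.length : Int)) → b ∈ S)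
instance (g : List (List Int)) : Decidable (Pre_bfs g) := by unfold Pre_bfs; infer_instance

def pvWitness_bfs : List (List Int) := [[1], [0, 2], []]

def Spec_bfs (g : List (List Int)) (out : Int) : Prop := out = bfs_alt g
instance (g : List (List Int)) (out : Int) : Decidable (Spec_bfs g out) := by unfold Spec_bfs; infer_instance

-- ===== CLAIM (what is proved, stated in full; the proofs are below) =====
def Claim_equal_bfs : Prop := ∀ (g : List (List Int)), Dom_bfs g → Pre_bfs g → Spec_bfs g (bfs g)

-- ===== LEMMAS AND PROOFS =====

-- The proof goes through an intermediate level-synchronous BFS (`altLoop` below, a proof-side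
-- device): first A's queue loop is shown to compute `altLoop`'s answer (row_lemma/main_lemma),
-- then `altLoop` is shown to compute B's closure loop (visit_fold/step_fold/level_eq_closure).

-- proof-side innermost step: `if not visited[v]: visited[v] = True; nxt.append(v)`
def altVisit (st : List Bool × List Int) (v : Int) : List Bool × List Int :=
  match PySem.List.pyGet? st.1 v with
  | none => st
  | some b =>
    if b then st
    else (PySem.List.pySetD st.1 v true, st.2 ++ [v])

theorem altVisit_bound (st : List Bool × List Int) (v : Int) :
    2 * (altVisit st v).1.count false + (altVisit st v).2.length
      <= 2 * st.1.count false + st.2.length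
    ∧ st.2.length <= (altVisit st v).2.length := by
  unfold altVisit
  cases h : PySem.List.pyGet? st.1 v with
  | none => exact ⟨le_refl _, le_refl _⟩
  | some b =>
    simp only
    split_ifs with h1
    · exact ⟨le_refl _, le_refl _⟩
    · obtain ⟨k, hk, hkv, -, hys⟩ := pyAccess st.1 v b h
      have hb : st.1[k] = false := by
        rw [List.getElem?_eq_getElem hk] at hkv
        have := Option.some.inj hkv
        rw [this]
        exact Bool.eq_false_iff.mpr h1
      have hcnt := count_set_lt st.1 false k hk hb true (by simp)
      rw [(hys st.1 rfl).2]
      simp only [List.length_append, List.length_cons, List.length_nil]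
      omega

-- proof-side `for v in g[u]` loop, for one frontier node u
def altStep (g : List (List Int)) (st : List Bool × List Int) (u : Int) : List Bool × List Int :=
  ((PySem.List.pyGet? g u).getD []).foldl altVisit st

-- one whole level: `nxt = []; for u in frontier: for v in g[u]: …`
def altNext (g : List (List Int)) (visited : List Bool) (frontier : List Int) :
    List Bool × List Int :=
  frontier.foldl (altStep g) (visited, [])

theorem altRow_bound (row : List Int) (st : List Bool × List Int) :
    2 * (row.foldl altVisit st).1.count false + (row.foldl altVisit st).2.length
      <= 2 * st.1.count false + st.2.length := by
  induction row generalizing st with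
  | nil => exact le_refl _
  | cons v rest ih =>
    have h1 := altVisit_bound st v
    have h2 := ih (altVisit st v)
    simp only [List.foldl_cons] at *
    omega

theorem altFold_bound (g : List (List Int)) (l : List Int) (st : List Bool × List Int) :
    2 * (l.foldl (altStep g) st).1.count false + (l.foldl (altStep g) st).2.length
      <= 2 * st.1.count false + st.2.length := by
  induction l generalizing st with
  | nil => exact le_refl _
  | cons u rest ih =>
    have h1 := altRow_bound ((PySem.List.pyGet? g u).getD []) st
    have h2 := ih (altStep g st u)
    simp only [List.foldl_cons] at *
    exact le_trans h2 h1

theorem altNext_bound (g : List (List Int)) (visited : List Bool) (frontier : List Int) :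
    2 * (altNext g visited frontier).1.count false + (altNext g visited frontier).2.length
      <= 2 * visited.count false := by
  have h := altFold_bound g frontier (visited, [])
  simpa [altNext] using h

-- proof-side level loop: `while frontier: depth += 1; …; frontier = nxt`
def altLoop (g : List (List Int)) (visited : List Bool) (frontier : List Int) (depth : Int) : Int :=
  if frontier.isEmpty then depth
  else
    let st := altNext g visited frontier
    altLoop g st.1 st.2 (depth + 1)
termination_by 2 * visited.count false + (if frontier.isEmpty then 0 else 1)
decreasing_by
  rename_i hne
  have hb := altNext_bound g visited frontier
  have hfl : (if (altNext g visited frontier).2.isEmpty then 0 else 1)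
      <= (altNext g visited frontier).2.length := by
    cases h : (altNext g visited frontier).2 <;> simp
  simp only [if_neg hne]
  omega

-- `vis` is f's visited mask: same length, and each cell says whether f's cell is marked (≠ -1)
def VisInv (f : List Int) (vis : List Bool) : Prop :=
  vis.length = f.length ∧
  ∀ (k : Nat) (w : Int), f[k]? = some w → vis[k]? = some (decide (w ≠ -1))

-- every node id of l reads cell value d (Python indexing, so possibly negative ids)
def LevelInv (f : List Int) (l : List Int) (d : Int) : Prop :=
  ∀ x ∈ l, PySem.List.pyGet? f x = some d

-- the normalized index of node id x belongs to S
def NodeInS (g : List (List Int)) (S : Finset (Fin g.length)) (x : Int) : Prop :=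
  ∀ (k : Nat) (h : k < g.length),
    ((k : Int) = x ∨ (k : Int) = x + (g.length : Int)) → (⟨k, h⟩ : Fin g.length) ∈ S

-- effect of one whole row (A's inner for-loop vs the level device's inner for-loop): both append
-- the same fresh nodes d; A marks their f-cells with depth+2, the device sets visited-cells true
theorem row_lemma (now depth : Int) (hd : -1 ≤ depth) :
    ∀ (row f q : List Int) (vis : List Bool) (nxt : List Int),
    (∀ v ∈ row, -(f.length : Int) ≤ v ∧ v < (f.length : Int)) →
    PySem.List.pyGet? f now = some (depth + 1) →
    VisInv f vis →
    ∃ f' d vis',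
      row.foldl (bfsInnerStep now) (f, q) = (f', q ++ d) ∧
      row.foldl altVisit (vis, nxt) = (vis', nxt ++ d) ∧
      f'.length = f.length ∧
      VisInv f' vis' ∧
      (∀ (j : Nat) (v : Int), f[j]? = some v → v ≠ -1 → f'[j]? = some v) ∧
      (∀ (j : Nat) (v' : Int), f'[j]? = some v' → (f[j]? = some v' ∨ v' = depth + 2)) ∧
      LevelInv f' d (depth + 2) ∧
      (∀ x ∈ d, x ∈ row) ∧
      (d = [] → f' = f) := by
  intro row
  induction row with
  | nil =>
    intro f q vis nxt _ _ hvis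
    exact ⟨f, [], vis, by simp, by simp, rfl, hvis, fun j v h _ => h,
      fun j v' h => Or.inl h, fun x hx => absurd hx (List.not_mem_nil),
      fun x hx => absurd hx (List.not_mem_nil), fun _ => rfl⟩
  | cons v r ih =>
    intro f q vis nxt hrow hnow hvis
    obtain ⟨hvlo, hvhi⟩ := hrow v List.mem_cons_self
    have hin : PySem.List.pyGet? f v ≠ none := by
      intro hc
      rw [PySem.List.pyGet?_eq_none_iff] at hc
      exact hc ⟨hvlo, hvhi⟩
    obtain ⟨w, hw⟩ := Option.ne_none_iff_exists'.mp hin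
    obtain ⟨k, hk, hkget, hkchar, hys⟩ := pyAccess f v w hw
    have hvislen : vis.length = f.length := hvis.1
    have hvisv : PySem.List.pyGet? vis v = some (decide (w ≠ -1)) := by
      rw [(hys vis hvislen).1]
      exact hvis.2 k w hkget
    by_cases hcell : w = -1
    · -- fresh node: A writes depth+2 into f and appends, the device marks visited and appends
      subst hcell
      have hAstep : bfsInnerStep now (f, q) v
          = (f.set k (depth + 2), q ++ [v]) := by
        unfold bfsInnerStep
        rw [hw]
        simp only [ne_eq, not_true_eq_false, if_false, hnow, Option.getD_some]
        rw [if_neg (by omega : ¬ (depth + 1 + 1 = -1)), (hys f rfl).2]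
        have he : depth + 1 + 1 = depth + 2 := by ring
        rw [he]
      have hBstep : altVisit (vis, nxt) v = (vis.set k true, nxt ++ [v]) := by
        unfold altVisit
        rw [hvisv]
        have hdec : (decide ((-1 : Int) ≠ -1)) = false := by decide
        rw [hdec]
        simp only [if_false, Bool.false_eq_true]
        rw [(hys vis hvislen).2]
      set f1 := f.set k (depth + 2) with hf1
      set vis1 := vis.set k true with hvis1def
      have hlen1 : f1.length = f.length := by simp [hf1]
      have hget1 : ∀ j : Nat, f1[j]? = if k = j then some (depth + 2) else f[j]? := by
        intro j
        rw [hf1, List.getElem?_set, if_pos hk]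
      have hkvis : k < vis.length := by rw [hvislen]; exact hk
      have hvget1 : ∀ j : Nat, vis1[j]? = if k = j then some true else vis[j]? := by
        intro j
        rw [hvis1def, List.getElem?_set, if_pos hkvis]
      have hfk : f[k] = -1 := by
        rw [List.getElem?_eq_getElem hk] at hkget
        exact Option.some.inj hkget
      obtain ⟨kn, hkn, hknget, hknchar, hysn⟩ := pyAccess f now (depth + 1) hnow
      have hkkn : k ≠ kn := by
        intro he
        rw [he, List.getElem?_eq_getElem hkn] at hkget
        have h1 := Option.some.inj hkget
        rw [List.getElem?_eq_getElem hkn] at hknget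
        have h2 := Option.some.inj hknget
        omega
      have hnow1 : PySem.List.pyGet? f1 now = some (depth + 1) := by
        rw [(hysn f1 hlen1).1, hget1 kn, if_neg hkkn]
        exact hknget
      have hvisinv1 : VisInv f1 vis1 := by
        refine ⟨by simp [hf1, hvis1def, hvislen], ?_⟩
        intro j w' hw'
        rw [hget1 j] at hw'
        rw [hvget1 j]
        by_cases hj : k = j
        · rw [if_pos hj] at hw'
          rw [if_pos hj]
          have hw2 : w' = depth + 2 := (Option.some.inj hw').symm
          rw [hw2, decide_eq_true (show (depth + 2 : Int) ≠ -1 by omega)]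
        · rw [if_neg hj] at hw'
          rw [if_neg hj]
          exact hvis.2 j w' hw'
      obtain ⟨f', d', vis', hA, hB, hlen', hvis', hpres, heither, hlev, hmr, hnil⟩ :=
        ih f1 (q ++ [v]) vis1 (nxt ++ [v])
          (fun u hu => by
            have := hrow u (List.mem_cons_of_mem _ hu)
            rw [hlen1]; exact this)
          hnow1 hvisinv1
      refine ⟨f', v :: d', vis', ?_, ?_, ?_, hvis', ?_, ?_, ?_, ?_, ?_⟩
      · rw [List.foldl_cons, hAstep, hA, ← List.append_cons]
      · rw [List.foldl_cons, hBstep, hB, ← List.append_cons]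
      · rw [hlen', hlen1]
      · intro j u hu hune
        refine hpres j u ?_ hune
        rw [hget1]
        split_ifs with hj
        · rw [← hj, List.getElem?_eq_getElem hk] at hu
          have := Option.some.inj hu
          exact absurd this.symm (by simp [hfk, hune])
        · exact hu
      · intro j u' hu'
        rcases heither j u' hu' with h1 | h2
        · rw [hget1] at h1
          split_ifs at h1 with hj
          · exact Or.inr (Option.some.inj h1).symm
          · exact Or.inl h1
        · exact Or.inr h2
      · intro x hx
        rcases List.mem_cons.1 hx with rfl | hx'
        · rw [(hys f' (by rw [hlen', hlen1])).1]
          exact hpres k (depth + 2) (by rw [hget1 k, if_pos rfl]) (by omega)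
        · exact hlev x hx'
      · intro x hx
        rcases List.mem_cons.1 hx with rfl | hx'
        · exact List.mem_cons_self
        · exact List.mem_cons_of_mem _ (hmr x hx')
      · intro h
        cases h
    · -- already-visited node: both sides skip
      have hAstep : bfsInnerStep now (f, q) v = (f, q) := by
        unfold bfsInnerStep
        rw [hw]
        simp [hcell]
      have hBstep : altVisit (vis, nxt) v = (vis, nxt) := by
        unfold altVisit
        rw [hvisv, decide_eq_true hcell]
        simp
      rw [List.foldl_cons, List.foldl_cons, hAstep, hBstep]
      obtain ⟨f', d', vis', hA, hB, hlen', hvis', hpres, heither, hlev, hmr, hnil⟩ :=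
        ih f q vis nxt (fun u hu => hrow u (List.mem_cons_of_mem _ hu)) hnow hvis
      exact ⟨f', d', vis', hA, hB, hlen', hvis', hpres, heither, hlev,
        fun x hx => List.mem_cons_of_mem _ (hmr x hx), hnil⟩

theorem main_lemma (g : List (List Int)) (S : Finset (Fin g.length))
    (hS : ∀ a ∈ S, ∀ v ∈ g[a.val]'a.isLt,
      (-(g.length : Int) ≤ v ∧ v < (g.length : Int)) ∧
      ∀ b : Fin g.length, ((b.val : Int) = v ∨ (b.val : Int) = v + (g.length : Int)) → b ∈ S) :
    ∀ (K : Nat) (f q : List Int) (i : Nat) (vis : List Bool) (rest nxt : List Int) (depth : Int),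
    2 * (2 * f.count (-1) + (q.length - i)) + (if rest = [] then 1 else 0) = K →
    f.length = g.length →
    i ≤ q.length →
    q.drop i = rest ++ nxt →
    VisInv f vis →
    LevelInv f rest (depth + 1) →
    LevelInv f nxt (depth + 2) →
    (∀ x ∈ rest, NodeInS g S x) →
    (∀ x ∈ nxt, NodeInS g S x) →
    (∀ v ∈ f, -1 ≤ v ∧ v ≤ (if nxt = [] then depth + 1 else depth + 2)) →
    (∃ v ∈ f, v = (if nxt = [] then depth + 1 else depth + 2)) →
    -1 ≤ depth →
    (PySem.List.max? (bfsLoop g f q i) (fun x => x)).getD 0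
      = altLoop g (rest.foldl (altStep g) (vis, nxt)).1 (rest.foldl (altStep g) (vis, nxt)).2 (depth + 1) := by
  intro K
  induction K using Nat.strong_induction_on with
  | _ K ih =>
  intro f q i vis rest nxt depth hK hlen hi hdrop hvis hrest hnxt hrestS hnxtS hbound hwit hdep
  rcases rest with _ | ⟨now, rest'⟩
  · -- current level fully processed
    simp only [List.foldl_nil]
    by_cases hnxt0 : nxt = []
    · -- nothing left at all: A's queue is exhausted, the device's frontier is empty
      subst hnxt0
      simp only [List.append_nil] at hdrop
      have hqi : q.length ≤ i := List.drop_eq_nil_iff.1 hdrop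
      rw [bfsLoop, dif_neg (by omega : ¬ i < q.length)]
      rw [altLoop]
      simp only [List.isEmpty_nil, if_true]
      rw [if_pos rfl] at hbound
      rw [if_pos rfl] at hwit
      cases hf : f with
      | nil =>
        rw [hf] at hwit
        obtain ⟨v, hv, -⟩ := hwit
        exact absurd hv (List.not_mem_nil)
      | cons x t =>
        rw [hf] at hbound hwit
        rw [PySem.List.max?_id_cons, Option.getD_some]
        obtain ⟨hxle, hall⟩ := PySem.List.le_foldl_max t x
        obtain ⟨w, hw, hwv⟩ := hwit
        have hub : t.foldl max x ≤ depth + 1 := by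
          rcases PySem.List.foldl_max_mem t x with h | h
          · rw [h]; exact (hbound x List.mem_cons_self).2
          · exact (hbound _ (List.mem_cons_of_mem _ h)).2
        have hlb : depth + 1 ≤ t.foldl max x := by
          rcases List.mem_cons.1 hw with rfl | h
          · omega
          · have := hall w h; omega
        omega
    · -- level shift: the device starts the next level, A's state is unchanged
      rw [altLoop]
      rw [if_neg (by simp [hnxt0])]
      have he : depth + 1 + 1 = depth + 2 := by ring
      have hres := ih (2 * (2 * f.count (-1) + (q.length - i)) + 0)
        (by rw [if_pos rfl] at hK; omega)
        f q i vis nxt [] (depth + 1)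
        (by simp [hnxt0]) hlen hi (by simpa using hdrop) hvis
        (by rw [he]; exact hnxt)
        (fun x hx => absurd hx (List.not_mem_nil))
        hnxtS
        (fun x hx => absurd hx (List.not_mem_nil))
        (by rw [if_pos rfl, he]; rw [if_neg hnxt0] at hbound; exact hbound)
        (by rw [if_pos rfl, he]; rw [if_neg hnxt0] at hwit; exact hwit)
        (by omega)
      rw [hres]
      rfl
  · -- A processes one node `now` of the current level
    have hdroplen := congrArg List.length hdrop
    simp only [List.length_drop, List.cons_append, List.length_cons] at hdroplen
    have hi2 : i < q.length := by omega
    rw [List.drop_eq_getElem_cons hi2, List.cons_append] at hdrop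
    injection hdrop with hqi hdrop2
    have hnow_pg : PySem.List.pyGet? f now = some (depth + 1) :=
      hrest now List.mem_cons_self
    obtain ⟨kn, hkn, hknget, hknchar, hysn⟩ := pyAccess f now (depth + 1) hnow_pg
    have hkng : kn < g.length := by rw [← hlen]; exact hkn
    have hrow_pg : PySem.List.pyGet? g now = some (g[kn]'hkng) := by
      rw [(hysn g (by rw [hlen])).1, List.getElem?_eq_getElem hkng]
    have hchar' : (kn : Int) = now ∨ (kn : Int) = now + (g.length : Int) := by
      rw [← hlen]; exact hknchar
    have hnowS : (⟨kn, hkng⟩ : Fin g.length) ∈ S :=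
      hrestS now List.mem_cons_self kn hkng hchar'
    have hSrow := hS ⟨kn, hkng⟩ hnowS
    have hrowbnd : ∀ v ∈ g[kn]'hkng, -(f.length : Int) ≤ v ∧ v < (f.length : Int) := by
      intro v hv
      rw [hlen]
      exact (hSrow v hv).1
    have hsucc : ∀ v ∈ g[kn]'hkng, NodeInS g S v := by
      intro v hv k h hc
      exact (hSrow v hv).2 ⟨k, h⟩ hc
    obtain ⟨f', d, vis', hA, hB, hlen', hvis', hpres, heither, hlev, hmr, hdnil⟩ :=
      row_lemma now depth hdep (g[kn]'hkng) f q vis nxt hrowbnd hnow_pg hvis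
    rw [bfsLoop, dif_pos hi2]
    simp only [hqi, hrow_pg, Option.getD_some, hA]
    rw [List.foldl_cons]
    have hBstep : altStep g (vis, nxt) now = (vis', nxt ++ d) := by
      unfold altStep
      rw [hrow_pg, Option.getD_some]
      exact hB
    rw [hBstep]
    have hbnd2 := bfsInner_bound now (g[kn]'hkng) (f, q)
    rw [hA] at hbnd2
    simp only [List.length_append] at hbnd2
    have hfl : (if rest' = ([] : List Int) then 1 else 0) ≤ 1 := by split_ifs <;> omega
    have hlt : 2 * (2 * f'.count (-1) + ((q ++ d).length - (i + 1)))
        + (if rest' = ([] : List Int) then 1 else 0) < K := by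
      simp only [if_neg (List.cons_ne_nil now rest')] at hK
      simp only [List.length_append]
      omega
    refine (ih _ hlt f' (q ++ d) (i + 1) vis' rest' (nxt ++ d) depth rfl
      (hlen'.trans hlen) (by simp only [List.length_append]; omega) ?_ hvis' ?_ ?_ ?_ ?_ ?_ ?_ hdep)
    · rw [List.drop_append_of_le_length (by omega), hdrop2, List.append_assoc]
    · intro x hx
      have hxg := hrest x (List.mem_cons_of_mem _ hx)
      obtain ⟨kx, hkx, hkxget, -, hysx⟩ := pyAccess f x (depth + 1) hxg
      rw [(hysx f' (by rw [hlen'])).1]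
      exact hpres kx (depth + 1) hkxget (by omega)
    · intro x hx
      rcases List.mem_append.1 hx with h | h
      · have hxg := hnxt x h
        obtain ⟨kx, hkx, hkxget, -, hysx⟩ := pyAccess f x (depth + 2) hxg
        rw [(hysx f' (by rw [hlen'])).1]
        exact hpres kx (depth + 2) hkxget (by omega)
      · exact hlev x h
    · exact fun x hx => hrestS x (List.mem_cons_of_mem _ hx)
    · intro x hx
      rcases List.mem_append.1 hx with h' | h'
      · exact hnxtS x h'
      · exact hsucc x (hmr x h')
    · by_cases hd0 : d = []
      · rw [hdnil hd0, hd0, List.append_nil]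
        exact hbound
      · have hne2 : nxt ++ d ≠ [] := by simp [hd0]
        rw [if_neg hne2]
        intro w hw
        obtain ⟨j, hj⟩ := List.mem_iff_getElem?.1 hw
        rcases heither j w hj with h1 | h2
        · have hmem : w ∈ f := List.mem_iff_getElem?.2 ⟨j, h1⟩
          have hb := hbound w hmem
          refine ⟨hb.1, ?_⟩
          split_ifs at hb with h <;> omega
        · constructor <;> omega
    · by_cases hd0 : d = []
      · rw [hdnil hd0, hd0, List.append_nil]
        exact hwit
      · have hne2 : nxt ++ d ≠ [] := by simp [hd0]
        rcases d with _ | ⟨y, d2⟩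
        · exact absurd rfl hd0
        · have hy := hlev y List.mem_cons_self
          obtain ⟨ky, hky, hkyget, -, -⟩ := pyAccess f' y (depth + 2) hy
          exact ⟨depth + 2, List.mem_iff_getElem?.2 ⟨ky, hkyget⟩, by rw [if_neg hne2]⟩

theorem repl_set_get {a : Type} (x y : a) (n j : Nat) (hn : 0 < n) :
    ((List.replicate n x).set 0 y)[j]? =
      if j = 0 then some y else if j < n then some x else none := by
  rw [List.getElem?_set, List.length_replicate, List.getElem?_replicate]
  by_cases h0 : j = 0
  · subst h0
    rw [if_pos rfl, if_pos hn, if_pos rfl]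
  · rw [if_neg (fun h => h0 h.symm), if_neg h0]

-- A's port computes the level device's answer
theorem A_eq_level (g : List (List Int)) (hpre : Pre_bfs g) :
    bfs g = altLoop g ((List.replicate g.length false).set 0 true) [0] (-1) := by
  obtain ⟨hne, S, hS0, hS⟩ := hpre
  have hn : 0 < g.length := List.length_pos_iff.2 hne
  unfold bfs
  rw [if_neg (by omega)]
  set f0 := (List.replicate g.length (-1 : Int)).set 0 0 with hf0
  set vis0 := (List.replicate g.length false).set 0 true with hvis0def
  have hlen0 : f0.length = g.length := by simp [hf0]
  have hvis0 : VisInv f0 vis0 := by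
    refine ⟨by simp [hf0, hvis0def], ?_⟩
    intro k w hw
    rw [hf0, repl_set_get _ _ _ _ hn] at hw
    rw [hvis0def, repl_set_get _ _ _ _ hn]
    split_ifs at hw with h1 h2
    · have hw0 : w = 0 := (Option.some.inj hw).symm
      rw [if_pos h1, hw0]
      rfl
    · have hw1 : w = -1 := (Option.some.inj hw).symm
      rw [if_neg h1, if_pos h2, hw1]
      rfl
  have hrest0 : LevelInv f0 [0] (-1 + 1) := by
    intro x hx
    have hx0 : x = 0 := by simpa using hx
    subst hx0
    rw [PySem.List.pyGet?_zero, hf0, repl_set_get _ _ _ _ hn]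
    norm_num
  have hrestS0 : ∀ x ∈ ([0] : List Int), NodeInS g S x := by
    intro x hx k h hchar
    have hx0 : x = 0 := by simpa using hx
    subst hx0
    have hk0 : k = 0 := by rcases hchar with h' | h' <;> omega
    exact hS0 ⟨k, h⟩ hk0
  have hbound0 : ∀ v ∈ f0, -1 ≤ v ∧ v ≤ (if ([] : List Int) = [] then -1 + 1 else -1 + 2) := by
    intro v hv
    rcases List.mem_or_eq_of_mem_set hv with h | h
    · simp [(List.mem_replicate.1 h).2]
    · simp [h]
  have hwit0 : ∃ v ∈ f0, v = (if ([] : List Int) = [] then -1 + 1 else -1 + 2) := by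
    refine ⟨0, ?_, by simp⟩
    exact List.mem_iff_getElem?.2 ⟨0, by rw [hf0, repl_set_get _ _ _ _ hn]; simp⟩
  have hres := main_lemma g S (fun a ha => hS a ha)
    (2 * (2 * f0.count (-1) + ([(0 : Int)].length - 0)) + (if [(0 : Int)] = [] then 1 else 0))
    f0 [0] 0 vis0 [0] [] (-1) rfl hlen0 (by simp) (by simp) hvis0 hrest0
    (fun x hx => absurd hx (List.not_mem_nil))
    hrestS0
    (fun x hx => absurd hx (List.not_mem_nil))
    hbound0
    hwit0
    (by omega)
  rw [show altLoop g vis0 [0] (-1)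
      = altLoop g (altNext g vis0 [0]).1 (altNext g vis0 [0]).2 (-1 + 1) from by
    rw [altLoop]; rfl]
  exact hres

-- ===== the level device equals B's closure loop =====

-- Python's normalized node id: x % n
def nrm (n : Nat) (x : Int) : Int := PySem.Int.mod x (n : Int)

theorem nrm_nonneg (n : Nat) (hn : 0 < n) (x : Int) : 0 ≤ nrm n x :=
  PySem.Int.mod_nonneg x (by exact_mod_cast hn)

theorem nrm_lt (n : Nat) (hn : 0 < n) (x : Int) : nrm n x < (n : Int) :=
  PySem.Int.mod_lt x (by exact_mod_cast hn)

theorem nrm_of_nonneg (n : Nat) (hn : 0 < n) (x : Int) (h0 : 0 ≤ x) (h1 : x < (n : Int)) :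
    nrm n x = x := by
  unfold nrm
  rw [PySem.Int.mod_eq_emod_of_pos (by exact_mod_cast hn : (0:Int) < (n:Int))]
  exact Int.emod_eq_of_lt h0 h1

theorem nrm_of_neg (n : Nat) (hn : 0 < n) (x : Int) (h0 : -(n : Int) ≤ x) (h1 : x < 0) :
    nrm n x = x + n := by
  unfold nrm
  rw [PySem.Int.mod_eq_emod_of_pos (by exact_mod_cast hn : (0:Int) < (n:Int))]
  have h2 : x % (n : Int) = (x + (n : Int) * 1) % (n : Int) := by
    rw [Int.add_mul_emod_self_left]
  rw [h2]
  simp only [mul_one]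
  exact Int.emod_eq_of_lt (by omega) (by omega)

-- Python read/write at a possibly negative in-range index goes to cell (x % n)
theorem pyGet?_nrm {a : Type} (n : Nat) (hn : 0 < n) (xs : List a) (hlen : xs.length = n)
    (x : Int) (h0 : -(n : Int) ≤ x) (h1 : x < (n : Int)) :
    PySem.List.pyGet? xs x = xs[(nrm n x).toNat]? := by
  unfold PySem.List.pyGet? PySem.List.pyIdx?
  rw [hlen]
  by_cases hx : 0 ≤ x
  · rw [if_pos hx, if_pos (by omega)]
    have : (nrm n x).toNat = x.toNat := by rw [nrm_of_nonneg n hn x hx h1]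
    rw [this]
    simp
  · rw [if_neg hx, if_pos (by omega)]
    have : (nrm n x).toNat = n - (-x).toNat := by
      rw [nrm_of_neg n hn x h0 (by omega)]
      omega
    rw [this]
    simp

theorem pySetD_nrm (n : Nat) (hn : 0 < n) (xs : List Bool) (hlen : xs.length = n)
    (x : Int) (h0 : -(n : Int) ≤ x) (h1 : x < (n : Int)) (w : Bool) :
    PySem.List.pySetD xs x w = xs.set (nrm n x).toNat w := by
  unfold PySem.List.pySetD PySem.List.pySet? PySem.List.pyIdx?
  rw [hlen]
  by_cases hx : 0 ≤ x
  · rw [if_pos hx, if_pos (by omega)]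
    have : (nrm n x).toNat = x.toNat := by rw [nrm_of_nonneg n hn x hx h1]
    rw [this]
    simp
  · rw [if_neg hx, if_pos (by omega)]
    have : (nrm n x).toNat = n - (-x).toNat := by
      rw [nrm_of_neg n hn x h0 (by omega)]
      omega
    rw [this]
    simp

-- the row Python reads for node id u (exact when u is in range)
def rowOf (g : List (List Int)) (u : Int) : List Int := (PySem.List.pyGet? g u).getD []

theorem rowOf_eq (g : List (List Int)) (hn : 0 < g.length) (u : Int)
    (h0 : -(g.length : Int) ≤ u) (h1 : u < (g.length : Int)) :
    ∃ hk : (nrm g.length u).toNat < g.length, rowOf g u = g[(nrm g.length u).toNat]'hk := by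
  have hk : (nrm g.length u).toNat < g.length := by
    have := nrm_lt g.length hn u
    have := nrm_nonneg g.length hn u
    omega
  refine ⟨hk, ?_⟩
  unfold rowOf
  rw [pyGet?_nrm g.length hn g rfl u h0 h1, List.getElem?_eq_getElem hk]
  rfl

-- rows of ids with the same normalization coincide
theorem rowOf_congr (g : List (List Int)) (hn : 0 < g.length) (u x : Int)
    (hu0 : -(g.length : Int) ≤ u) (hu1 : u < (g.length : Int))
    (hx0 : -(g.length : Int) ≤ x) (hx1 : x < (g.length : Int))
    (h : nrm g.length u = nrm g.length x) : rowOf g u = rowOf g x := by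
  obtain ⟨hk1, he1⟩ := rowOf_eq g hn u hu0 hu1
  obtain ⟨hk2, he2⟩ := rowOf_eq g hn x hx0 hx1
  rw [he1, he2]
  congr 1
  rw [h]

-- every id's row equals its normalized id's row
theorem rowOf_nrm (g : List (List Int)) (hn : 0 < g.length) (x : Int)
    (h0 : -(g.length : Int) ≤ x) (h1 : x < (g.length : Int)) :
    rowOf g x = rowOf g (nrm g.length x) := by
  have ha := nrm_nonneg g.length hn x
  have hb := nrm_lt g.length hn x
  exact rowOf_congr g hn x (nrm g.length x) h0 h1 (by omega) hb
    ((nrm_of_nonneg g.length hn (nrm g.length x) ha hb).symm)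

-- one inner row fold of the level device, characterized by membership
theorem visit_fold (n : Nat) (hn : 0 < n) :
    ∀ (row : List Int) (vis : List Bool) (nxt : List Int),
    vis.length = n →
    (∀ v ∈ row, -(n : Int) ≤ v ∧ v < (n : Int)) →
    ∃ d vis',
      row.foldl altVisit (vis, nxt) = (vis', nxt ++ d) ∧
      vis'.length = n ∧
      (∀ v ∈ d, v ∈ row) ∧
      (∀ k : Nat, vis'[k]? = some true ↔ (vis[k]? = some true ∨ ∃ v ∈ d, (k : Int) = nrm n v)) ∧
      (∀ v ∈ row, vis'[(nrm n v).toNat]? = some true) ∧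
      (∀ v ∈ d, vis[(nrm n v).toNat]? = some false) := by
  intro row
  induction row with
  | nil =>
    intro vis nxt hlen _
    refine ⟨[], vis, by simp, hlen, by simp, ?_, by simp, by simp⟩
    intro k
    simp
  | cons v r ih =>
    intro vis nxt hlen hrange
    obtain ⟨hv0, hv1⟩ := hrange v List.mem_cons_self
    have hk0lt : (nrm n v).toNat < n := by
      have := nrm_lt n hn v
      have := nrm_nonneg n hn v
      omega
    set k0 := (nrm n v).toNat with hk0def
    have hk0vis : k0 < vis.length := by omega
    have hget : PySem.List.pyGet? vis v = some (vis[k0]'hk0vis) := by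
      rw [pyGet?_nrm n hn vis hlen v hv0 hv1, List.getElem?_eq_getElem hk0vis]
    by_cases hb : vis[k0]'hk0vis = true
    · -- already visited: skip
      have hstep : altVisit (vis, nxt) v = (vis, nxt) := by
        unfold altVisit
        rw [hget, hb]
        simp
      rw [List.foldl_cons, hstep]
      obtain ⟨d, vis', hfold, hlen', hmem, hiff, hrowvis, hfresh⟩ :=
        ih vis nxt hlen (fun w hw => hrange w (List.mem_cons_of_mem _ hw))
      refine ⟨d, vis', hfold, hlen', fun w hw => List.mem_cons_of_mem _ (hmem w hw), hiff, ?_,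
        hfresh⟩
      intro w hw
      rcases List.mem_cons.1 hw with rfl | hw'
      · exact (hiff k0).2 (Or.inl (by rw [List.getElem?_eq_getElem hk0vis, hb]))
      · exact hrowvis w hw'
    · -- fresh: mark and append
      have hstep : altVisit (vis, nxt) v = (vis.set k0 true, nxt ++ [v]) := by
        have hb2 : vis[k0]'hk0vis = false := Bool.eq_false_iff.mpr hb
        unfold altVisit
        rw [hget, hb2]
        simp only [Bool.false_eq_true, if_false]
        rw [pySetD_nrm n hn vis hlen v hv0 hv1, hk0def]
      rw [List.foldl_cons, hstep]
      have hlen1 : (vis.set k0 true).length = n := by simp [hlen]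
      obtain ⟨d, vis', hfold, hlen', hmem, hiff, hrowvis, hfresh⟩ :=
        ih (vis.set k0 true) (nxt ++ [v]) hlen1 (fun w hw => hrange w (List.mem_cons_of_mem _ hw))
      have hset : ∀ j : Nat, (vis.set k0 true)[j]? = if k0 = j then some true else vis[j]? := by
        intro j
        rw [List.getElem?_set, if_pos hk0vis]
      refine ⟨v :: d, vis', ?_, hlen', ?_, ?_, ?_, ?_⟩
      · rw [hfold, List.append_assoc]
        rfl
      · intro w hw
        rcases List.mem_cons.1 hw with rfl | hw'
        · exact List.mem_cons_self
        · exact List.mem_cons_of_mem _ (hmem w hw')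
      · intro k
        rw [hiff k, hset k]
        constructor
        · rintro (h | h)
          · split_ifs at h with hj
            · exact Or.inr ⟨v, List.mem_cons_self, by have := nrm_nonneg n hn v; omega⟩
            · exact Or.inl h
          · obtain ⟨w, hw, hwe⟩ := h
            exact Or.inr ⟨w, List.mem_cons_of_mem _ hw, hwe⟩
        · rintro (h | ⟨w, hw, hwe⟩)
          · left
            by_cases hj : k0 = k
            · rw [if_pos hj]
            · rw [if_neg hj]; exact h
          · rcases List.mem_cons.1 hw with rfl | hw'
            · left
              rw [if_pos (by omega)]
            · exact Or.inr ⟨w, hw', hwe⟩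
      · intro w hw
        rcases List.mem_cons.1 hw with rfl | hw'
        · exact (hiff k0).2 (Or.inl (by rw [hset k0, if_pos rfl]))
        · exact hrowvis w hw'
      · intro w hw
        rcases List.mem_cons.1 hw with rfl | hw'
        · rw [List.getElem?_eq_getElem hk0vis]
          exact congrArg some (Bool.eq_false_iff.2 hb)
        · have := hfresh w hw'
          rw [hset ((nrm n w).toNat)] at this
          split_ifs at this with hj
          · exact absurd (Option.some.inj this) (by simp)
          · exact this

-- one whole level of the device, characterized by membership
theorem step_fold (g : List (List Int)) (hn : 0 < g.length) :
    ∀ (F : List Int) (vis : List Bool) (nxt : List Int),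
    vis.length = g.length →
    (∀ x ∈ F, -(g.length : Int) ≤ x ∧ x < (g.length : Int)) →
    (∀ x ∈ F, ∀ v ∈ rowOf g x, -(g.length : Int) ≤ v ∧ v < (g.length : Int)) →
    ∃ d vis',
      F.foldl (altStep g) (vis, nxt) = (vis', nxt ++ d) ∧
      vis'.length = g.length ∧
      (∀ v ∈ d, ∃ x ∈ F, v ∈ rowOf g x) ∧
      (∀ k : Nat, vis'[k]? = some true ↔
        (vis[k]? = some true ∨ ∃ v ∈ d, (k : Int) = nrm g.length v)) ∧
      (∀ x ∈ F, ∀ v ∈ rowOf g x, vis'[(nrm g.length v).toNat]? = some true) ∧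
      (∀ v ∈ d, vis[(nrm g.length v).toNat]? = some false) := by
  intro F
  induction F with
  | nil =>
    intro vis nxt hlen _ _
    refine ⟨[], vis, by simp, hlen, by simp, ?_, by simp, by simp⟩
    intro k
    simp
  | cons u F' ih =>
    intro vis nxt hlen hFr hFrow
    have hu := hFr u List.mem_cons_self
    have hstep : altStep g (vis, nxt) u = (rowOf g u).foldl altVisit (vis, nxt) := rfl
    obtain ⟨d1, vis1, hf1, hlen1, hmem1, hiff1, hrow1, hfresh1⟩ :=
      visit_fold g.length hn (rowOf g u) vis nxt hlen (hFrow u List.mem_cons_self)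
    obtain ⟨d2, vis2, hf2, hlen2, hmem2, hiff2, hrow2, hfresh2⟩ :=
      ih vis1 (nxt ++ d1) hlen1 (fun x hx => hFr x (List.mem_cons_of_mem _ hx))
        (fun x hx => hFrow x (List.mem_cons_of_mem _ hx))
    refine ⟨d1 ++ d2, vis2, ?_, hlen2, ?_, ?_, ?_, ?_⟩
    · rw [List.foldl_cons, hstep, hf1, hf2, List.append_assoc]
    · intro v hv
      rcases List.mem_append.1 hv with h | h
      · exact ⟨u, List.mem_cons_self, hmem1 v h⟩
      · obtain ⟨x, hx, hvx⟩ := hmem2 v h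
        exact ⟨x, List.mem_cons_of_mem _ hx, hvx⟩
    · intro k
      rw [hiff2 k, hiff1 k]
      constructor
      · rintro ((h | ⟨w, hw, hwe⟩) | ⟨w, hw, hwe⟩)
        · exact Or.inl h
        · exact Or.inr ⟨w, List.mem_append.2 (Or.inl hw), hwe⟩
        · exact Or.inr ⟨w, List.mem_append.2 (Or.inr hw), hwe⟩
      · rintro (h | ⟨w, hw, hwe⟩)
        · exact Or.inl (Or.inl h)
        · rcases List.mem_append.1 hw with h' | h'
          · exact Or.inl (Or.inr ⟨w, h', hwe⟩)
          · exact Or.inr ⟨w, h', hwe⟩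
    · intro x hx v hv
      rcases List.mem_cons.1 hx with rfl | hx'
      · exact (hiff2 _).2 (Or.inl (hrow1 v hv))
      · exact hrow2 x hx' v hv
    · intro v hv
      rcases List.mem_append.1 hv with h | h
      · exact hfresh1 v h
      · have h2 := hfresh2 v h
        have hklt : (nrm g.length v).toNat < g.length := by
          have := nrm_lt g.length hn v
          have := nrm_nonneg g.length hn v
          omega
        have hkvis : (nrm g.length v).toNat < vis.length := by omega
        rw [List.getElem?_eq_getElem hkvis]
        by_cases hb : vis[(nrm g.length v).toNat]'hkvis = true
        · exfalso
          have : vis1[(nrm g.length v).toNat]? = some true :=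
            (hiff1 _).2 (Or.inl (by rw [List.getElem?_eq_getElem hkvis, hb]))
          rw [h2] at this
          exact absurd (Option.some.inj this) (by simp)
        · exact congrArg some (Bool.eq_false_iff.2 hb)
-- `for v in new: reach[v] = True`, characterized by membership
theorem markAll_spec (n : Nat) (hn : 0 < n) :
    ∀ (l : List Int) (vis : List Bool), vis.length = n →
    (∀ v ∈ l, -(n : Int) ≤ v ∧ v < (n : Int)) →
    (markAll vis l).length = n ∧
    ∀ k : Nat, (markAll vis l)[k]? = some true ↔
      (vis[k]? = some true ∨ ∃ v ∈ l, (k : Int) = nrm n v) := by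
  intro l
  induction l with
  | nil =>
    intro vis hlen _
    refine ⟨hlen, ?_⟩
    intro k
    simp [markAll]
  | cons v t ih =>
    intro vis hlen hr
    obtain ⟨hv0, hv1⟩ := hr v List.mem_cons_self
    have hstep : markAll vis (v :: t) = markAll (vis.set (nrm n v).toNat true) t := by
      unfold markAll
      rw [List.foldl_cons, pySetD_nrm n hn vis hlen v hv0 hv1]
    have hk0lt : (nrm n v).toNat < vis.length := by
      have := nrm_nonneg n hn v
      have := nrm_lt n hn v
      omega
    have hset : ∀ j : Nat, (vis.set (nrm n v).toNat true)[j]? =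
        if (nrm n v).toNat = j then some true else vis[j]? := by
      intro j
      rw [List.getElem?_set, if_pos hk0lt]
    obtain ⟨hlen', hiff⟩ := ih (vis.set (nrm n v).toNat true) (by simp [hlen])
      (fun w hw => hr w (List.mem_cons_of_mem _ hw))
    rw [hstep]
    refine ⟨hlen', ?_⟩
    intro k
    rw [hiff k, hset k]
    constructor
    · rintro (h | ⟨w, hw, hwe⟩)
      · split_ifs at h with hj
        · refine Or.inr ⟨v, List.mem_cons_self, ?_⟩
          have := nrm_nonneg n hn v
          omega
        · exact Or.inl h
      · exact Or.inr ⟨w, List.mem_cons_of_mem _ hw, hwe⟩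
    · rintro (h | ⟨w, hw, hwe⟩)
      · left
        by_cases hj : (nrm n v).toNat = k
        · rw [if_pos hj]
        · rw [if_neg hj]; exact h
      · rcases List.mem_cons.1 hw with rfl | hw'
        · left
          have := nrm_nonneg n hn w
          rw [if_pos (by omega)]
        · exact Or.inr ⟨w, hw', hwe⟩

-- membership in B's per-round comprehension
theorem mem_newFresh (g : List (List Int)) (hn : 0 < g.length) (vis : List Bool)
    (hlen : vis.length = g.length) (v : Int) :
    v ∈ newFresh g g.length vis ↔
      ∃ k : Nat, k < g.length ∧ vis[k]? = some true ∧ v ∈ rowOf g (k : Int) ∧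
        (PySem.List.pyGet? vis v).getD true = false := by
  unfold newFresh
  rw [List.mem_flatMap]
  constructor
  · rintro ⟨u, hu, hv⟩
    obtain ⟨hu0, hu1⟩ := PySem.List.mem_pyRange_one.mp hu
    split_ifs at hv with hcond
    · rw [List.mem_filter] at hv
      obtain ⟨hvrow, hvpred⟩ := hv
      have hulttn : u.toNat < g.length := by omega
      have hgetu : PySem.List.pyGet? vis u = vis[u.toNat]? := by
        rw [pyGet?_nrm g.length hn vis hlen u (by omega) hu1]
        have : (nrm g.length u).toNat = u.toNat := by
          rw [nrm_of_nonneg g.length hn u hu0 hu1]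
        rw [this]
      have hvt : vis[u.toNat]? = some true := by
        rw [hgetu] at hcond
        rw [List.getElem?_eq_getElem (by omega : u.toNat < vis.length)] at hcond ⊢
        rw [Option.getD_some] at hcond
        rw [hcond]
      refine ⟨u.toNat, hulttn, hvt, ?_, ?_⟩
      · have hcast : ((u.toNat : Nat) : Int) = u := by omega
        rw [hcast]
        exact hvrow
      · rw [Bool.not_eq_eq_eq_not, Bool.not_true] at hvpred
        exact hvpred
    · exact absurd hv (List.not_mem_nil)
  · rintro ⟨k, hk, hkvis, hkrow, hfreshv⟩
    refine ⟨(k : Int), PySem.List.mem_pyRange_one.mpr (by omega), ?_⟩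
    have hgetk : PySem.List.pyGet? vis (k : Int) = vis[k]? := by
      rw [pyGet?_nrm g.length hn vis hlen (k : Int) (by omega) (by omega)]
      have : (nrm g.length (k : Int)).toNat = k := by
        rw [nrm_of_nonneg g.length hn (k : Int) (by omega) (by omega)]
        omega
      rw [this]
    rw [if_pos (by rw [hgetk, hkvis]; rfl)]
    rw [List.mem_filter]
    refine ⟨hkrow, ?_⟩
    rw [hfreshv]
    rfl

-- the level device equals B's closure loop (the shared state is the visited/reached array itself)
set_option maxHeartbeats 1000000 in
theorem level_eq_closure (g : List (List Int)) (hn : 0 < g.length) (S : Finset (Fin g.length))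
    (hS : ∀ a ∈ S, ∀ v ∈ g[a.val]'a.isLt,
      (-(g.length : Int) ≤ v ∧ v < (g.length : Int)) ∧
      ∀ b : Fin g.length, ((b.val : Int) = v ∨ (b.val : Int) = v + (g.length : Int)) → b ∈ S) :
    ∀ (fuel : Nat) (vis : List Bool) (F : List Int) (depth : Int),
    F ≠ [] →
    vis.length = g.length →
    (∀ (k : Nat) (hk : k < g.length), vis[k]? = some true → (⟨k, hk⟩ : Fin g.length) ∈ S) →
    (∀ x ∈ F, -(g.length : Int) ≤ x ∧ x < (g.length : Int)) →
    (∀ x ∈ F, vis[(nrm g.length x).toNat]? = some true) →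
    (∀ k : Nat, k < g.length → vis[k]? = some true → (∀ x ∈ F, (nrm g.length x).toNat ≠ k) →
      ∀ v ∈ rowOf g (k : Int), vis[(nrm g.length v).toNat]? = some true) →
    vis.count false + 1 ≤ fuel →
    altLoop g vis F depth = bLoop g g.length fuel vis (depth + 1) := by
  intro fuel
  induction fuel with
  | zero =>
    intro vis F depth _ _ _ _ _ _ hfuel
    omega
  | succ fuel' ih =>
    intro vis F depth hF hvlen hSv hFr hFvis hclosed hfuel
    -- rows of the frontier are rows of S-members: in range and S-closed
    have hFrowS : ∀ x ∈ F, ∀ v ∈ rowOf g x,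
        (-(g.length : Int) ≤ v ∧ v < (g.length : Int)) ∧
        ∀ b : Fin g.length, ((b.val : Int) = v ∨ (b.val : Int) = v + (g.length : Int)) → b ∈ S := by
      intro x hx v hv
      have hxr := hFr x hx
      have h0 := nrm_nonneg g.length hn x
      have h1 := nrm_lt g.length hn x
      have hklt : (nrm g.length x).toNat < g.length := by omega
      have hmemS : (⟨(nrm g.length x).toNat, hklt⟩ : Fin g.length) ∈ S :=
        hSv _ hklt (hFvis x hx)
      obtain ⟨hk2, he⟩ := rowOf_eq g hn x hxr.1 hxr.2
      rw [he] at hv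
      exact hS _ hmemS v hv
    -- likewise for rows of any marked cell
    have hCellRowS : ∀ k : Nat, k < g.length → vis[k]? = some true → ∀ v ∈ rowOf g (k : Int),
        (-(g.length : Int) ≤ v ∧ v < (g.length : Int)) ∧
        ∀ b : Fin g.length, ((b.val : Int) = v ∨ (b.val : Int) = v + (g.length : Int)) → b ∈ S := by
      intro k hk hkvis v hv
      obtain ⟨hk2, he⟩ := rowOf_eq g hn (k : Int) (by omega) (by omega)
      have hidx : (nrm g.length (k : Int)).toNat = k := by
        rw [nrm_of_nonneg g.length hn (k : Int) (by omega) (by omega)]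
        omega
      have hgg : g[(nrm g.length (k : Int)).toNat]'hk2 = g[k]'hk := by
        congr 1
      rw [he, hgg] at hv
      exact hS ⟨k, hk⟩ (hSv k hk hkvis) v hv
    have hFrow : ∀ x ∈ F, ∀ v ∈ rowOf g x, -(g.length : Int) ≤ v ∧ v < (g.length : Int) :=
      fun x hx v hv => (hFrowS x hx v hv).1
    obtain ⟨d, vis', hfold, hvlen', hmemd, hiff, hrowvis, hfresh⟩ :=
      step_fold g hn F vis [] hvlen hFr hFrow
    have hANext : altNext g vis F = (vis', d) := by
      unfold altNext
      rw [hfold]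
      simp
    have hdrange : ∀ w ∈ d, -(g.length : Int) ≤ w ∧ w < (g.length : Int) := by
      intro w hw
      obtain ⟨x, hx, hwx⟩ := hmemd w hw
      exact hFrow x hx w hwx
    -- the fresh test `not reach[v]` read at the normalized cell
    have hfreshIff : ∀ v : Int, -(g.length : Int) ≤ v → v < (g.length : Int) →
        ((PySem.List.pyGet? vis v).getD true = false ↔
          vis[(nrm g.length v).toNat]? = some false) := by
      intro v h0 h1
      rw [pyGet?_nrm g.length hn vis hvlen v h0 h1]
      have hklt : (nrm g.length v).toNat < vis.length := by
        have := nrm_nonneg g.length hn v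
        have := nrm_lt g.length hn v
        omega
      rw [List.getElem?_eq_getElem hklt]
      simp
    -- a frontier id's row is the row of its normalized cell
    have hrow_cell : ∀ x ∈ F, rowOf g ((((nrm g.length x).toNat : Nat)) : Int) = rowOf g x := by
      intro x hx
      have hxr := hFr x hx
      have h0 := nrm_nonneg g.length hn x
      have hcast : (((nrm g.length x).toNat : Nat) : Int) = nrm g.length x := by omega
      rw [hcast]
      exact (rowOf_nrm g hn x hxr.1 hxr.2).symm
    -- B's comprehension and the device's fresh nodes mark the same cells
    have hd_sub : ∀ w ∈ d, w ∈ newFresh g g.length vis := by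
      intro w hw
      obtain ⟨x, hx, hwx⟩ := hmemd w hw
      have h0 := nrm_nonneg g.length hn x
      have h1 := nrm_lt g.length hn x
      refine (mem_newFresh g hn vis hvlen w).mpr
        ⟨(nrm g.length x).toNat, by omega, hFvis x hx, ?_, ?_⟩
      · rw [hrow_cell x hx]
        exact hwx
      · have hwr := hdrange w hw
        rw [hfreshIff w hwr.1 hwr.2]
        exact hfresh w hw
    have hnew_char : ∀ y ∈ newFresh g g.length vis, ∃ w ∈ d, nrm g.length y = nrm g.length w := by
      intro y hy
      obtain ⟨k, hk, hkvis, hyrow, hyfresh⟩ := (mem_newFresh g hn vis hvlen y).mp hy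
      have hyr := (hCellRowS k hk hkvis y hyrow).1
      rw [hfreshIff y hyr.1 hyr.2] at hyfresh
      by_cases hcase : ∀ x ∈ F, (nrm g.length x).toNat ≠ k
      · exfalso
        have := hclosed k hk hkvis hcase y hyrow
        rw [this] at hyfresh
        simp at hyfresh
      · push_neg at hcase
        obtain ⟨x, hx, hxe⟩ := hcase
        have hyrow' : y ∈ rowOf g x := by
          rw [← hrow_cell x hx, hxe]
          exact hyrow
        have hvt := hrowvis x hx y hyrow'
        rw [hiff _] at hvt
        rcases hvt with h | ⟨w, hw, hwe⟩
        · rw [h] at hyfresh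
          simp at hyfresh
        · refine ⟨w, hw, ?_⟩
          have h0 := nrm_nonneg g.length hn y
          omega
    have hnewRange : ∀ y ∈ newFresh g g.length vis,
        -(g.length : Int) ≤ y ∧ y < (g.length : Int) := by
      intro y hy
      obtain ⟨k, hk, hkvis, hyrow, -⟩ := (mem_newFresh g hn vis hvlen y).mp hy
      exact (hCellRowS k hk hkvis y hyrow).1
    -- hence B's per-round update produces exactly the device's updated array
    obtain ⟨hmlen, hmiff⟩ := markAll_spec g.length hn (newFresh g g.length vis) vis hvlen hnewRange
    have harr : markAll vis (newFresh g g.length vis) = vis' := by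
      apply List.ext_getElem?
      intro k
      by_cases hk : k < g.length
      · have hkm : k < (markAll vis (newFresh g g.length vis)).length := by omega
        have hkv : k < vis'.length := by omega
        rw [List.getElem?_eq_getElem hkm, List.getElem?_eq_getElem hkv]
        have hiffb : ((markAll vis (newFresh g g.length vis))[k]'hkm = true)
            ↔ (vis'[k]'hkv = true) := by
          constructor
          · intro h
            have h2 := (hmiff k).mp (by rw [List.getElem?_eq_getElem hkm, h])
            have h3 : vis'[k]? = some true := by
              rw [hiff k]
              rcases h2 with h2 | ⟨v, hv, hve⟩
              · exact Or.inl h2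
              · obtain ⟨w, hw, hwe⟩ := hnew_char v hv
                exact Or.inr ⟨w, hw, by omega⟩
            rw [List.getElem?_eq_getElem hkv] at h3
            exact Option.some.inj h3
          · intro h
            have h2 := (hiff k).mp (by rw [List.getElem?_eq_getElem hkv, h])
            have h3 : (markAll vis (newFresh g g.length vis))[k]? = some true := by
              rw [hmiff k]
              rcases h2 with h2 | ⟨w, hw, hwe⟩
              · exact Or.inl h2
              · exact Or.inr ⟨w, hd_sub w hw, hwe⟩
            rw [List.getElem?_eq_getElem hkm] at h3
            exact Option.some.inj h3
        congr 1
        by_cases hbx : (markAll vis (newFresh g g.length vis))[k]'hkm = true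
        · rw [hbx]
          exact (hiffb.mp hbx).symm
        · have hby : ¬ vis'[k]'hkv = true := fun hc => hbx (hiffb.mpr hc)
          rw [Bool.not_eq_true] at hbx hby
          rw [hbx, hby]
      · rw [List.getElem?_eq_none (by omega), List.getElem?_eq_none (by omega)]
    by_cases hd : d = []
    · -- closure reached: both sides stop at depth + 1
      subst hd
      have hnf_nil : newFresh g g.length vis = [] := by
        rw [List.eq_nil_iff_forall_not_mem]
        intro y hy
        obtain ⟨w, hw, -⟩ := hnew_char y hy
        exact absurd hw (List.not_mem_nil)
      rw [altLoop, if_neg (by simpa using hF), hANext]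
      rw [show altLoop g vis' [] (depth + 1) = depth + 1 from by rw [altLoop]; rfl]
      symm
      show (let nw := newFresh g g.length vis;
        if nw.isEmpty then depth + 1
        else bLoop g g.length fuel' (markAll vis nw) (depth + 1 + 1)) = depth + 1
      rw [hnf_nil]
      rfl
    · -- growth: both sides recurse on the same updated array
      have hnf_ne : newFresh g g.length vis ≠ [] := by
        rcases d with _ | ⟨w0, d'⟩
        · exact absurd rfl hd
        · intro hcon
          have := hd_sub w0 List.mem_cons_self
          rw [hcon] at this
          exact absurd this (List.not_mem_nil)
      have hstep : bLoop g g.length (fuel' + 1) vis (depth + 1)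
          = bLoop g g.length fuel' vis' (depth + 1 + 1) := by
        show (let nw := newFresh g g.length vis;
          if nw.isEmpty then depth + 1
          else bLoop g g.length fuel' (markAll vis nw) (depth + 1 + 1)) = _
        rw [if_neg (by simpa [List.isEmpty_iff] using hnf_ne), harr]
      rw [hstep]
      rw [altLoop, if_neg (by simpa using hF), hANext]
      -- invariants for the next round
      have hSv' : ∀ (k : Nat) (hk : k < g.length), vis'[k]? = some true →
          (⟨k, hk⟩ : Fin g.length) ∈ S := by
        intro k hk h
        rw [hiff k] at h
        rcases h with h | ⟨w, hw, hwe⟩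
        · exact hSv k hk h
        · obtain ⟨x, hx, hwx⟩ := hmemd w hw
          have hfact := hFrowS x hx w hwx
          refine hfact.2 ⟨k, hk⟩ ?_
          have hw0 := hfact.1.1
          have hw1 := hfact.1.2
          by_cases hwp : 0 ≤ w
          · left
            have : nrm g.length w = w := nrm_of_nonneg g.length hn w hwp hw1
            show ((k : Nat) : Int) = w
            omega
          · right
            have : nrm g.length w = w + g.length := nrm_of_neg g.length hn w hw0 (by omega)
            show ((k : Nat) : Int) = w + g.length
            omega
      have hFvis' : ∀ w ∈ d, vis'[(nrm g.length w).toNat]? = some true := by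
        intro w hw
        obtain ⟨x, hx, hwx⟩ := hmemd w hw
        exact hrowvis x hx w hwx
      have hrow_cell' : ∀ w ∈ d, rowOf g ((((nrm g.length w).toNat : Nat)) : Int) = rowOf g w := by
        intro w hw
        have hwr := hdrange w hw
        have h0 := nrm_nonneg g.length hn w
        have hcast : (((nrm g.length w).toNat : Nat) : Int) = nrm g.length w := by omega
        rw [hcast]
        exact (rowOf_nrm g hn w hwr.1 hwr.2).symm
      have hclosed' : ∀ k : Nat, k < g.length → vis'[k]? = some true →
          (∀ w ∈ d, (nrm g.length w).toNat ≠ k) →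
          ∀ v ∈ rowOf g (k : Int), vis'[(nrm g.length v).toNat]? = some true := by
        intro k hk hkvis hnot v hv
        rw [hiff k] at hkvis
        rcases hkvis with h | ⟨w, hw, hwe⟩
        · by_cases hcase : ∀ x ∈ F, (nrm g.length x).toNat ≠ k
          · have := hclosed k hk h hcase v hv
            exact (hiff _).mpr (Or.inl this)
          · push_neg at hcase
            obtain ⟨x, hx, hxe⟩ := hcase
            have hv' : v ∈ rowOf g x := by
              rw [← hrow_cell x hx, hxe]
              exact hv
            exact hrowvis x hx v hv'
        · exfalso
          refine hnot w hw ?_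
          have h0 := nrm_nonneg g.length hn w
          omega
      have hfuel' : vis'.count false + 1 ≤ fuel' := by
        have hb := altFold_bound g F (vis, [])
        rw [hfold] at hb
        simp only [List.length_append, List.length_nil, List.nil_append] at hb
        have hdlen : 1 ≤ d.length := by
          rcases d with _ | ⟨w0, d'⟩
          · exact absurd rfl hd
          · simp
        omega
      exact ih vis' d (depth + 1) hd hvlen' hSv' hdrange hFvis' hclosed' hfuel'

-- ===== VERDICT (by name: the statement is the Claim_ definition above) =====
theorem bfs_spec : Claim_equal_bfs := by
  intro g _ hpre
  have hpre' := hpre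
  obtain ⟨hne, S, hS0, hS⟩ := hpre'
  have hn : 0 < g.length := List.length_pos_iff.2 hne
  unfold Spec_bfs
  rw [A_eq_level g hpre]
  set vis0 := (List.replicate g.length false).set 0 true with hvis0def
  have hvis0len : vis0.length = g.length := by simp [hvis0def]
  have hvis0get : ∀ k : Nat, vis0[k]? =
      if k = 0 then some true else if k < g.length then some false else none := by
    intro k
    rw [hvis0def]
    exact repl_set_get _ _ _ _ hn
  have hnrm0 : (nrm g.length (0 : Int)).toNat = 0 := by
    rw [nrm_of_nonneg g.length hn 0 le_rfl (by exact_mod_cast hn)]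
    decide
  have hres := level_eq_closure g hn S hS g.length vis0 [0] (-1)
    (by simp) hvis0len
    (by
      intro k hk h
      rw [hvis0get k] at h
      by_cases h1 : k = 0
      · exact hS0 ⟨k, hk⟩ h1
      · rw [if_neg h1, if_pos hk] at h
        exact absurd (Option.some.inj h) (by simp))
    (by intro x hx; have hx0 : x = 0 := List.mem_singleton.1 hx; omega)
    (by
      intro x hx
      have hx0 : x = 0 := List.mem_singleton.1 hx
      subst hx0
      rw [hnrm0, hvis0get 0, if_pos rfl])
    (by
      intro k hk hkvis hnot v hv
      exfalso
      refine hnot 0 List.mem_cons_self ?_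
      rw [hvis0get k] at hkvis
      by_cases h1 : k = 0
      · rw [hnrm0, h1]
      · rw [if_neg h1, if_pos hk] at hkvis
        exact absurd (Option.some.inj hkvis) (by simp))
    (by
      -- count false of [False]*n with cell 0 set True is n - 1
      obtain ⟨m, hm⟩ : ∃ m, g.length = m + 1 := ⟨g.length - 1, by omega⟩
      rw [hvis0def, hm, List.replicate_succ, List.set_cons_zero]
      simp [List.count_replicate])
  rw [hres]
  unfold bfs_alt
  rw [if_neg (by omega)]
  rw [PySem.List.pySetD_of_nonneg _ _ (by norm_num)]
  norm_num
  rfl
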